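-- pv_equiv track=rewrite | github.com/AkcayFx/VulnHunter | src/vulnhunter/scope/manager.py | _matches_domain_list
-- ===== SOURCE A (Python) =====
-- def _matches_domain_list(hostname: str, patterns: tuple[str, ...]) -> bool:
--     """Check if hostname matches any pattern (supports wildcards like *.example.com)."""
--     hostname = hostname.lower().strip(".")
--     for pattern in patterns:
--         pattern = pattern.lower().strip(".")
--         if pattern.startswith("*."):
--             # *.example.com matches sub.example.com and example.com itself
--             base = pattern[2:]
--             if hostname == base or hostname.endswith(f".{base}"):
--                 return True
--         else:
--             if hostname == pattern:
--                 return True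
--     return False
-- ===== SOURCE B (Python) =====
-- def _matches_domain_list(hostname: str, patterns: tuple[str, ...]) -> bool:
--     """Check if hostname matches any pattern (supports wildcards like *.example.com)."""
--     h = hostname.lower().strip(".")
--     exact = set()
--     wild = set()
--     for p in patterns:
--         q = p.lower().strip(".")
--         if q.startswith("*."):
--             wild.add(q[2:])
--         else:
--             exact.add(q)
--     if h in exact:
--         return True
--     cands = {h}
--     for i, c in enumerate(h):
--         if c == ".":
--             cands.add(h[i + 1:])
--     return not cands.isdisjoint(wild)
-- ===== Notes on version B (the rewrite author's own statement) =====
-- stated objective: alternative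
-- what changed: Instead of testing each pattern against the hostname with startswith/endswith comparisons, B builds two sets (exact patterns and wildcard bases) in one pass over the patterns, then answers by set membership of the hostname and of its dot-suffix candidates.
import Mathlib
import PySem

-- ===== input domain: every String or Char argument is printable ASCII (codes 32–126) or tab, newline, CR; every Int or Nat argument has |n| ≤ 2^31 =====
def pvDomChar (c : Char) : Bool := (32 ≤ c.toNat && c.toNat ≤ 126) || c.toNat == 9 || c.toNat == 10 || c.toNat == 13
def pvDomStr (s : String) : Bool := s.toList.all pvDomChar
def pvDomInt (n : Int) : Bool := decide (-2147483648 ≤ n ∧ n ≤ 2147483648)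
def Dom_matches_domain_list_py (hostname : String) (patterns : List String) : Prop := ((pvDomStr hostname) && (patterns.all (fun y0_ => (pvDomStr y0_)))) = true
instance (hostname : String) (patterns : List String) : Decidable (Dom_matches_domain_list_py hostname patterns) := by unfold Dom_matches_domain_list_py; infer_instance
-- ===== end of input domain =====

-- B replaces A's per-pattern wildcard/endswith scan by two sets built in one pass over the
-- patterns plus a membership test of the hostname's dot-suffixes (objective: alternative
-- decomposition; it trades the per-pattern suffix comparisons for set lookups).

-- ===== PORT A =====
/-- `s.lower().strip(".")` — the normalisation both Pythons apply, on code points. -/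
def pyNorm (s : String) : List Char :=
  PySem.Chars.stripChars (PySem.Chars.lower s.toList) ['.']

/-- A's `for pattern in patterns` loop with its early returns. -/
def aLoop (h : List Char) : List String → Bool
  | [] => false
  | pattern :: rest =>
    let p := pyNorm pattern
    if PySem.Chars.startswith p ['*', '.'] then
      let base := PySem.List.slice p (some 2) none
      if h = base ∨ PySem.Chars.endswith h ('.' :: base) = true then true else aLoop h rest
    else
      if h = p then true else aLoop h rest

def matches_domain_list_py (hostname : String) (patterns : List String) : Bool :=
  aLoop (pyNorm hostname) patterns

-- ===== PORT B =====
/-- B's single pass over the patterns: build `(exact_patterns, wildcard_bases)`. -/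
def bClassify (patterns : List String) : PySem.Set (List Char) × PySem.Set (List Char) :=
  patterns.foldl (fun acc p =>
    let q := pyNorm p
    if PySem.Chars.startswith q ['*', '.'] then
      (acc.1, PySem.Set.add acc.2 (PySem.List.slice q (some 2) none))
    else
      (PySem.Set.add acc.1 q, acc.2)) (PySem.Set.empty, PySem.Set.empty)

/-- B's candidate set: the hostname plus, for each dot, the part after it. -/
def bCands (h : List Char) : PySem.Set (List Char) :=
  (PySem.List.enumerate h).foldl (fun s ic =>
    if ic.2 == '.' then PySem.Set.add s (PySem.List.slice h (some (ic.1 + 1)) none) else s)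
    (PySem.Set.ofList [h])

def matches_domain_list_py_alt (hostname : String) (patterns : List String) : Bool :=
  let h := pyNorm hostname
  let ew := bClassify patterns
  if PySem.Set.contains ew.1 h then true
  else !(PySem.Set.isdisjoint (bCands h) ew.2)

-- ===== PRECONDITION & SPEC =====
def Spec_matches_domain_list_py (hostname : String) (patterns : List String) (out : Bool) : Prop := out = matches_domain_list_py_alt hostname patterns
instance (hostname : String) (patterns : List String) (out : Bool) : Decidable (Spec_matches_domain_list_py hostname patterns out) := by unfold Spec_matches_domain_list_py; infer_instance

-- ===== CLAIM (what is proved, stated in full; the proofs are below) =====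
def Claim_equal_matches_domain_list_py : Prop := ∀ (hostname : String) (patterns : List String), Dom_matches_domain_list_py hostname patterns → Spec_matches_domain_list_py hostname patterns (matches_domain_list_py hostname patterns)

-- ===== LEMMAS AND PROOFS =====

theorem slice_two (p : List Char) : PySem.List.slice p (some 2) none = p.drop 2 := by
  rw [PySem.List.slice_from p (by norm_num : (0:Int) ≤ 2)]; rfl

/-- A's per-pattern test on the normalised pattern, as one Bool. -/
def AMatchB (h : List Char) (p : String) : Bool :=
  if PySem.Chars.startswith (pyNorm p) ['*', '.'] then
    decide (h = (pyNorm p).drop 2) || PySem.Chars.endswith h ('.' :: (pyNorm p).drop 2)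
  else decide (h = pyNorm p)

theorem aLoop_eq_any (h : List Char) (ps : List String) :
    aLoop h ps = ps.any (AMatchB h) := by
  induction ps with
  | nil => simp [aLoop]
  | cons p rest ih =>
    simp only [aLoop, slice_two, List.any_cons, ← ih]
    by_cases hw : PySem.Chars.startswith (pyNorm p) ['*', '.'] = true
    · simp [AMatchB, hw]
    · simp [AMatchB, hw]

/-- `bClassify`'s fold step with `q[2:]` already reduced to `List.drop 2` (proof helper). -/
def classStep (acc : PySem.Set (List Char) × PySem.Set (List Char)) (p : String) :
    PySem.Set (List Char) × PySem.Set (List Char) :=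
  if PySem.Chars.startswith (pyNorm p) ['*', '.'] then
    (acc.1, PySem.Set.add acc.2 ((pyNorm p).drop 2))
  else
    (PySem.Set.add acc.1 (pyNorm p), acc.2)

theorem bClassify_eq (ps : List String) :
    bClassify ps = ps.foldl classStep (PySem.Set.empty, PySem.Set.empty) := by
  unfold bClassify
  exact PySem.List.foldl_congr_mem _ _ _ _ (fun acc p _ => by
    simp only [classStep, slice_two])

theorem mem_bClassify (ps : List String) (e w : PySem.Set (List Char)) (x : List Char) :
    (x ∈ (ps.foldl classStep (e, w)).1 ↔
      x ∈ e ∨ ∃ p ∈ ps, ¬ PySem.Chars.startswith (pyNorm p) ['*', '.'] = true ∧ x = pyNorm p) ∧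
    (x ∈ (ps.foldl classStep (e, w)).2 ↔
      x ∈ w ∨ ∃ p ∈ ps, PySem.Chars.startswith (pyNorm p) ['*', '.'] = true ∧ x = (pyNorm p).drop 2) := by
  induction ps generalizing e w with
  | nil => simp
  | cons p rest ih =>
    rw [List.foldl_cons]
    by_cases hw : PySem.Chars.startswith (pyNorm p) ['*', '.'] = true
    · rw [show classStep (e, w) p = (e, PySem.Set.add w ((pyNorm p).drop 2)) from by
        simp only [classStep, if_pos hw]]
      obtain ⟨ih1, ih2⟩ := ih e (PySem.Set.add w ((pyNorm p).drop 2))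
      refine ⟨ih1.trans ?_, ih2.trans ?_⟩
      · constructor
        · rintro (he | ⟨q, hq, hmq⟩)
          · exact Or.inl he
          · exact Or.inr ⟨q, List.mem_cons_of_mem _ hq, hmq⟩
        · rintro (he | ⟨q, hq, hnw, hx⟩)
          · exact Or.inl he
          · rcases List.mem_cons.mp hq with rfl | hq'
            · exact absurd hw hnw
            · exact Or.inr ⟨q, hq', hnw, hx⟩
      · rw [PySem.Set.mem_add]
        constructor
        · rintro ((hwmem | hx) | ⟨q, hq, hmq⟩)
          · exact Or.inl hwmem
          · exact Or.inr ⟨p, List.mem_cons_self, hw, hx⟩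
          · exact Or.inr ⟨q, List.mem_cons_of_mem _ hq, hmq⟩
        · rintro (hwmem | ⟨q, hq, hqw, hx⟩)
          · exact Or.inl (Or.inl hwmem)
          · rcases List.mem_cons.mp hq with rfl | hq'
            · exact Or.inl (Or.inr hx)
            · exact Or.inr ⟨q, hq', hqw, hx⟩
    · rw [show classStep (e, w) p = (PySem.Set.add e (pyNorm p), w) from by
        simp only [classStep, if_neg hw]]
      obtain ⟨ih1, ih2⟩ := ih (PySem.Set.add e (pyNorm p)) w
      refine ⟨ih1.trans ?_, ih2.trans ?_⟩
      · rw [PySem.Set.mem_add]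
        constructor
        · rintro ((hemem | hx) | ⟨q, hq, hmq⟩)
          · exact Or.inl hemem
          · exact Or.inr ⟨p, List.mem_cons_self, hw, hx⟩
          · exact Or.inr ⟨q, List.mem_cons_of_mem _ hq, hmq⟩
        · rintro (hemem | ⟨q, hq, hnw, hx⟩)
          · exact Or.inl (Or.inl hemem)
          · rcases List.mem_cons.mp hq with rfl | hq'
            · exact Or.inl (Or.inr hx)
            · exact Or.inr ⟨q, hq', hnw, hx⟩
      · constructor
        · rintro (hwmem | ⟨q, hq, hmq⟩)
          · exact Or.inl hwmem
          · exact Or.inr ⟨q, List.mem_cons_of_mem _ hq, hmq⟩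
        · rintro (hwmem | ⟨q, hq, hqw, hx⟩)
          · exact Or.inl hwmem
          · rcases List.mem_cons.mp hq with rfl | hq'
            · exact absurd hqw hw
            · exact Or.inr ⟨q, hq', hqw, hx⟩

theorem mem_fold_add_dot (h : List Char) (l : List (Int × Char)) (s0 : PySem.Set (List Char)) (x : List Char) :
    x ∈ l.foldl (fun s ic =>
        if ic.2 == '.' then PySem.Set.add s (PySem.List.slice h (some (ic.1 + 1)) none) else s) s0 ↔
      x ∈ s0 ∨ ∃ ic ∈ l, ic.2 = '.' ∧ x = PySem.List.slice h (some (ic.1 + 1)) none := by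
  induction l generalizing s0 with
  | nil => simp
  | cons ic rest ih =>
    rw [List.foldl_cons]
    by_cases hd : ic.2 = '.'
    · rw [if_pos (by simpa using hd), ih, PySem.Set.mem_add]
      constructor
      · rintro ((hs | hx) | ⟨jc, hj, hjd, hx⟩)
        · exact Or.inl hs
        · exact Or.inr ⟨ic, List.mem_cons_self, hd, hx⟩
        · exact Or.inr ⟨jc, List.mem_cons_of_mem _ hj, hjd, hx⟩
      · rintro (hs | ⟨jc, hj, hjd, hx⟩)
        · exact Or.inl (Or.inl hs)
        · rcases List.mem_cons.mp hj with rfl | hj'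
          · exact Or.inl (Or.inr hx)
          · exact Or.inr ⟨jc, hj', hjd, hx⟩
    · rw [if_neg (by simpa using hd), ih]
      constructor
      · rintro (hs | ⟨jc, hj, hjd, hx⟩)
        · exact Or.inl hs
        · exact Or.inr ⟨jc, List.mem_cons_of_mem _ hj, hjd, hx⟩
      · rintro (hs | ⟨jc, hj, hjd, hx⟩)
        · exact Or.inl hs
        · rcases List.mem_cons.mp hj with rfl | hj'
          · exact absurd hjd hd
          · exact Or.inr ⟨jc, hj', hjd, hx⟩

theorem mem_bCands (h x : List Char) :
    x ∈ bCands h ↔ x = h ∨ ∃ i, ∃ _ : i < h.length, h[i] = '.' ∧ x = h.drop (i + 1) := by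
  unfold bCands
  rw [mem_fold_add_dot]
  constructor
  · rintro (hs | ⟨ic, hic, hd, hx⟩)
    · left; simpa [PySem.Set.ofList] using hs
    · obtain ⟨k, hk, rfl⟩ := (PySem.List.mem_enumerate_iff h 0 ic).mp hic
      refine Or.inr ⟨k, hk, hd, ?_⟩
      have hnat : (((0:Int) + (k:Int)) + 1).toNat = k + 1 := by omega
      rw [hx, PySem.List.slice_from h (by omega : (0:Int) ≤ (0 + (k:Int)) + 1), hnat]
  · rintro (rfl | ⟨i, hi, hd, hx⟩)
    · left; simp [PySem.Set.ofList]
    · refine Or.inr ⟨((i : Int), h[i]), (PySem.List.mem_enumerate_iff h 0 _).mpr ⟨i, hi, by simp⟩, hd, ?_⟩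
      have hnat : (((i:Int)) + 1).toNat = i + 1 := by omega
      rw [hx, PySem.List.slice_from h (by omega : (0:Int) ≤ (i:Int) + 1), hnat]

theorem endswith_dot_iff (h base : List Char) :
    PySem.Chars.endswith h ('.' :: base) = true ↔
      ∃ i, ∃ _ : i < h.length, h[i] = '.' ∧ h.drop (i + 1) = base := by
  rw [PySem.Chars.endswith_iff]
  constructor
  · rintro ⟨t, rfl⟩
    have hi : t.length < (t ++ '.' :: base).length := by simp
    have hd2 : (t ++ '.' :: base).drop t.length = '.' :: base := List.drop_left
    rw [List.drop_eq_getElem_cons hi] at hd2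
    obtain ⟨h1, h2⟩ := (List.cons.injEq _ _ _ _).mp hd2
    exact ⟨t.length, hi, h1, h2⟩
  · rintro ⟨i, hi, hd, hb⟩
    have hdrop : h.drop i = '.' :: base := by
      rw [List.drop_eq_getElem_cons hi, hd, hb]
    exact hdrop ▸ List.drop_suffix i h

-- ===== VERDICT (by name: the statement is the Claim_ definition above) =====
theorem matches_domain_list_py_spec : Claim_equal_matches_domain_list_py := by
  intro hostname patterns _
  unfold Spec_matches_domain_list_py matches_domain_list_py matches_domain_list_py_alt
  rw [Bool.eq_iff_iff]
  simp only [aLoop_eq_any, List.any_eq_true]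
  have hcl := fun x => mem_bClassify patterns PySem.Set.empty PySem.Set.empty x
  set h := pyNorm hostname with hh
  rw [bClassify_eq]
  set ew := patterns.foldl classStep (PySem.Set.empty, PySem.Set.empty) with hew
  by_cases hc : PySem.Set.contains ew.1 h = true
  · rw [if_pos hc]
    refine iff_of_true ?_ rfl
    have hmem : h ∈ ew.1 := by
      simpa [PySem.Set.contains] using hc
    rcases ((hcl h).1.mp hmem) with hcon | ⟨p, hp, hnw, hx⟩
    · exact absurd hcon (by simp [PySem.Set.empty])
    · exact ⟨p, hp, by simp [AMatchB, hnw, hx]⟩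
  · rw [if_neg hc]
    simp only [Bool.not_eq_true', Bool.eq_false_iff, Ne, PySem.Set.isdisjoint_iff]
    push Not
    constructor
    · rintro ⟨p, hp, hm⟩
      by_cases hw : PySem.Chars.startswith (pyNorm p) ['*', '.'] = true
      · simp only [AMatchB, if_pos hw, Bool.or_eq_true, decide_eq_true_eq] at hm
        have hbw : (pyNorm p).drop 2 ∈ ew.2 :=
          (hcl _).2.mpr (Or.inr ⟨p, hp, hw, rfl⟩)
        rcases hm with hm | hm
        · exact ⟨h, (mem_bCands h h).mpr (Or.inl rfl), hm ▸ hbw⟩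
        · obtain ⟨i, hi, hd, hb⟩ := (endswith_dot_iff h _).mp hm
          exact ⟨h.drop (i + 1), (mem_bCands h _).mpr (Or.inr ⟨i, hi, hd, rfl⟩), hb ▸ hbw⟩
      · simp only [AMatchB, if_neg hw, decide_eq_true_eq] at hm
        exfalso
        apply hc
        have : h ∈ ew.1 := (hcl h).1.mpr (Or.inr ⟨p, hp, hw, hm⟩)
        simpa [PySem.Set.contains] using this
    · rintro ⟨x, hxc, hxw⟩
      rcases ((hcl x).2.mp hxw) with hcon | ⟨p, hp, hw, hx⟩
      · exact absurd hcon (by simp [PySem.Set.empty])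
      · refine ⟨p, hp, ?_⟩
        simp only [AMatchB, if_pos hw, Bool.or_eq_true, decide_eq_true_eq]
        rcases (mem_bCands h x).mp hxc with rfl | ⟨i, hi, hd, hxd⟩
        · exact Or.inl hx
        · exact Or.inr ((endswith_dot_iff h _).mpr ⟨i, hi, hd, hx ▸ hxd.symm⟩)
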